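-- pv_equiv track=rewrite | github.com/cpccu/cpccu-contest-3 | E/48945485_WA_rahul_roy_E.py | life
-- ===== SOURCE A (Python) =====
-- def life(arr,n):
--     total = 0
--     ans = 0
--     for i in range(n):
--         total+=arr[i]
--         if arr[i]>=0:
--             ans+=arr[i]
--
--         if total<0:
--             return ans
-- ===== SOURCE B (Python) =====
-- def prefix_sums(xs):
--     out = []
--     t = 0
--     for x in xs:
--         t += x
--         out.append(t)
--     return out
--
--
-- def first_negative_index(pre):
--     for k, t in enumerate(pre):
--         if t < 0:
--             return k
--     return None
--
--
-- def life(arr, n):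
--     head = arr[:n] if n >= 0 else []
--     k = first_negative_index(prefix_sums(head))
--     if k is None:
--         return None
--     return sum(x for x in head[:k + 1] if x >= 0)
-- ===== Notes on version B (the rewrite author's own statement) =====
-- stated objective: alternative
-- what changed: A's single fused loop with running total/answer and an early return is replaced by a three-phase decomposition: build the prefix-sum table of arr[:n], find the first index where it is negative, then sum the non-negative elements of that inclusive prefix in a separate pass.
import Mathlib
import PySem

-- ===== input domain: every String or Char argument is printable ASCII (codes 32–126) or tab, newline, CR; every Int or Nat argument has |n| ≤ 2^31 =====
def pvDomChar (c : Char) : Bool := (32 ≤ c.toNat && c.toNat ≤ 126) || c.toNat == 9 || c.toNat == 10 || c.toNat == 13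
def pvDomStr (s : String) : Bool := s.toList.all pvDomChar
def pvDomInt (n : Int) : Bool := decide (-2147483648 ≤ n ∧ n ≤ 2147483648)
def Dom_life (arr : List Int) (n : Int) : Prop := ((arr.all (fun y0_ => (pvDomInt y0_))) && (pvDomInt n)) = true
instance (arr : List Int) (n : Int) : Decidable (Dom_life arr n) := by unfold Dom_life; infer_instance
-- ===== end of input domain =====

-- B replaces A's fused loop by a three-phase decomposition (prefix-sum table, first-negative
-- index, separate non-negative sum of the inclusive prefix); same O(n) cost ("alternative").

-- ===== PORT A =====
-- the for-loop over range(n) with running total/ans and early return;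
-- arr[i] is PySem.List.pyGet? (none = IndexError, excluded by Pre_life)
def lifeLoop (arr : List Int) (idxs : List Int) (total ans : Int) : Option Int :=
  match idxs with
  | [] => none
  | i :: rest =>
    match PySem.List.pyGet? arr i with
    | none => none
    | some v =>
      let total' := total + v
      let ans' := if v ≥ 0 then ans + v else ans
      if total' < 0 then some ans' else lifeLoop arr rest total' ans'

def life (arr : List Int) (n : Int) : Option Int :=
  lifeLoop arr (PySem.List.pyRange 0 n 1) 0 0

-- ===== PORT B =====
-- prefix_sums loop with accumulator t
def prefixSums (t : Int) (xs : List Int) : List Int :=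
  match xs with
  | [] => []
  | x :: rest => (t + x) :: prefixSums (t + x) rest

-- first_negative_index via enumerate
def firstNegIdx (pre : List Int) (k : Nat) : Option Nat :=
  match pre with
  | [] => none
  | t :: rest => if t < 0 then some k else firstNegIdx rest (k + 1)

-- sum(x for x in xs if x >= 0)
def sumNonneg (xs : List Int) : Int :=
  xs.foldl (fun s x => if x ≥ 0 then s + x else s) 0

def life_alt (arr : List Int) (n : Int) : Option Int :=
  let head := if n ≥ 0 then PySem.List.slice arr (some 0) (some n) else []
  match firstNegIdx (prefixSums 0 head) 0 with
  | none => none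
  | some k => some (sumNonneg (head.take (k + 1)))  -- head[:k+1], exact since k+1 ≥ 0

-- ===== PRECONDITION & SPEC =====
-- Pre_life excludes exactly the inputs on which A raises IndexError: those with n > len(arr)
-- where no prefix sum of arr is negative, so A's loop reads past the end of the list.
def Pre_life (arr : List Int) (n : Int) : Prop :=
  n ≤ (arr.length : Int) ∨ ∃ k : Nat, k < arr.length ∧ (arr.take (k + 1)).sum < 0
instance (arr : List Int) (n : Int) : Decidable (Pre_life arr n) := by unfold Pre_life; infer_instance
def pvWitness_life : List Int × Int := ([1, -2, 3], 3)

def Spec_life (arr : List Int) (n : Int) (out : Option Int) : Prop := out = life_alt arr n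
instance (arr : List Int) (n : Int) (out : Option Int) : Decidable (Spec_life arr n out) := by unfold Spec_life; infer_instance

-- ===== CLAIM (what is proved, stated in full; the proofs are below) =====
def Claim_equal_life : Prop := ∀ (arr : List Int) (n : Int), Dom_life arr n → Pre_life arr n → Spec_life arr n (life arr n)

-- ===== LEMMAS AND PROOFS =====

-- A's loop rewritten over the traversed ELEMENTS instead of indices
def lifeElems (l : List Int) (total ans : Int) : Option Int :=
  match l with
  | [] => none
  | v :: rest =>
    let total' := total + v
    let ans' := if v ≥ 0 then ans + v else ans
    if total' < 0 then some ans' else lifeElems rest total' ans'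

lemma firstNegIdx_shift (pre : List Int) (k : Nat) :
    firstNegIdx pre k = (firstNegIdx pre 0).map (· + k) := by
  induction pre generalizing k with
  | nil => simp [firstNegIdx]
  | cons t rest ih =>
    by_cases h : t < 0
    · simp [firstNegIdx, h]
    · simp only [firstNegIdx, if_neg h, ih (k + 1), ih 1, Option.map_map]
      cases firstNegIdx rest 0 with
      | none => simp
      | some v => simp; omega

lemma sumNonneg_foldl_shift (l : List Int) (s : Int) :
    l.foldl (fun s x => if x ≥ 0 then s + x else s) s = s + sumNonneg l := by
  induction l generalizing s with
  | nil => simp [sumNonneg]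
  | cons x rest ih =>
    simp only [sumNonneg, List.foldl]
    rw [ih, ih (if x ≥ 0 then 0 + x else 0)]
    split_ifs <;> ring

lemma sumNonneg_cons (x : Int) (l : List Int) :
    sumNonneg (x :: l) = (if x ≥ 0 then x else 0) + sumNonneg l := by
  simp only [sumNonneg, List.foldl]
  rw [sumNonneg_foldl_shift]
  split_ifs <;> simp [sumNonneg]

lemma elems_eq (l : List Int) : ∀ (total ans : Int),
    lifeElems l total ans =
      (firstNegIdx (prefixSums total l) 0).map (fun k => ans + sumNonneg (l.take (k + 1))) := by
  induction l with
  | nil => intro total ans; simp [lifeElems, prefixSums, firstNegIdx]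
  | cons v rest ih =>
    intro total ans
    simp only [lifeElems, prefixSums, firstNegIdx]
    by_cases h : total + v < 0
    · simp only [if_pos h, Option.map_some]
      rw [show ((1:Nat)) = 0 + 1 from rfl]
      simp [sumNonneg]
      split_ifs <;> ring
    · simp only [if_neg h]
      rw [ih, firstNegIdx_shift _ 1, Option.map_map]
      cases firstNegIdx (prefixSums (total + v) rest) 0 with
      | none => simp
      | some k =>
        simp only [Option.map_some, Function.comp, Option.some.injEq]
        rw [List.take_succ_cons, sumNonneg_cons]
        split_ifs <;> ring

lemma loop_eq (m : Nat) : ∀ (arr : List Int) (j n total ans : Int),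
    0 ≤ j → n ≤ (arr.length : Int) → m = (n - j).toNat →
    lifeLoop arr (PySem.List.pyRange j n 1) total ans =
      lifeElems ((arr.drop j.toNat).take (n - j).toNat) total ans := by
  induction m with
  | zero =>
    intro arr j n total ans hj hn hm
    have hnj : n ≤ j := by omega
    rw [PySem.List.pyRange_one_eq_nil hnj]
    have : (n - j).toNat = 0 := by omega
    simp [this, lifeLoop, lifeElems]
  | succ m ih =>
    intro arr j n total ans hj hn hm
    have hjn : j < n := by omega
    rw [PySem.List.pyRange_one_cons hjn]
    have hjl : j.toNat < arr.length := by omega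
    have hget : PySem.List.pyGet? arr j = some arr[j.toNat] :=
      PySem.List.pyGet?_eq_some_getElem arr hj (by omega)
    have hdrop : arr.drop j.toNat = arr[j.toNat] :: arr.drop (j.toNat + 1) :=
      List.drop_eq_getElem_cons hjl
    have htn : (n - j).toNat = (n - (j + 1)).toNat + 1 := by omega
    simp only [lifeLoop, hget, hdrop, htn, List.take_succ_cons, lifeElems]
    by_cases h : total + arr[j.toNat] < 0
    · simp [h]
    · simp only [if_neg h]
      have := ih arr (j + 1) n (total + arr[j.toNat])
        (if arr[j.toNat] ≥ 0 then ans + arr[j.toNat] else ans) (by omega) hn (by omega)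
      rw [this]
      have : (j + 1).toNat = j.toNat + 1 := by omega
      rw [this]

lemma prefixSums_length (l : List Int) : ∀ t : Int, (prefixSums t l).length = l.length := by
  induction l with
  | nil => intro t; rfl
  | cons x rest ih => intro t; simp [prefixSums, ih]

lemma prefixSums_getElem (l : List Int) : ∀ (k : Nat) (t : Int) (h : k < l.length),
    (prefixSums t l)[k]'(by rw [prefixSums_length]; exact h) = t + (l.take (k + 1)).sum := by
  induction l with
  | nil => intro k t h; simp at h
  | cons x rest ih =>
    intro k t h
    cases k with
    | zero => simp [prefixSums]
    | succ k =>
      simp only [prefixSums, List.getElem_cons_succ, List.take_succ_cons, List.sum_cons]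
      rw [ih k (t + x) (by simpa using h)]
      ring

lemma firstNegIdx_eq_none_iff (pre : List Int) : ∀ k : Nat,
    firstNegIdx pre k = none ↔ ∀ x ∈ pre, 0 ≤ x := by
  induction pre with
  | nil => intro k; simp [firstNegIdx]
  | cons t rest ih =>
    intro k
    by_cases h : t < 0
    · simp [firstNegIdx, h]
    · simp only [firstNegIdx, if_neg h, ih (k + 1), List.mem_cons]
      constructor
      · rintro hall x (rfl | hx)
        · omega
        · exact hall x hx
      · exact fun hall x hx => hall x (Or.inr hx)

lemma elems_isSome (arr : List Int)
    (h : ∃ k : Nat, k < arr.length ∧ (arr.take (k + 1)).sum < 0) :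
    (lifeElems arr 0 0).isSome := by
  obtain ⟨k, hk, hneg⟩ := h
  rw [elems_eq]
  cases hfn : firstNegIdx (prefixSums 0 arr) 0 with
  | some v => simp
  | none =>
    exfalso
    have hall := (firstNegIdx_eq_none_iff (prefixSums 0 arr) 0).mp hfn
    have hmem : (prefixSums 0 arr)[k]'(by rw [prefixSums_length]; exact hk) ∈ prefixSums 0 arr :=
      List.getElem_mem _
    have := hall _ hmem
    rw [prefixSums_getElem arr k 0 hk] at this
    omega

-- the loop also agrees with lifeElems over the whole list when an early return is guaranteed,
-- even if the index range extends past the end of arr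
lemma loop_eq2 (m : Nat) : ∀ (arr : List Int) (j n total ans : Int),
    0 ≤ j → (arr.length : Int) ≤ n → m = arr.length - j.toNat →
    (lifeElems (arr.drop j.toNat) total ans).isSome = true →
    lifeLoop arr (PySem.List.pyRange j n 1) total ans = lifeElems (arr.drop j.toNat) total ans := by
  induction m with
  | zero =>
    intro arr j n total ans hj hn hm hsome
    rw [List.drop_of_length_le (by omega)] at hsome ⊢
    simp [lifeElems] at hsome
  | succ m ih =>
    intro arr j n total ans hj hn hm hsome
    have hjl : j.toNat < arr.length := by omega
    have hjn : j < n := by omega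
    rw [PySem.List.pyRange_one_cons hjn]
    have hget : PySem.List.pyGet? arr j = some arr[j.toNat] :=
      PySem.List.pyGet?_eq_some_getElem arr hj (by omega)
    have hdrop : arr.drop j.toNat = arr[j.toNat] :: arr.drop (j.toNat + 1) :=
      List.drop_eq_getElem_cons hjl
    rw [hdrop] at hsome ⊢
    simp only [lifeLoop, hget, lifeElems]
    by_cases h : total + arr[j.toNat] < 0
    · simp [h]
    · simp only [if_neg h]
      simp only [lifeElems, if_neg h] at hsome
      have h1 : (j + 1).toNat = j.toNat + 1 := by omega
      have := ih arr (j + 1) n (total + arr[j.toNat])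
        (if arr[j.toNat] ≥ 0 then ans + arr[j.toNat] else ans) (by omega) hn (by omega)
        (by rw [h1]; exact hsome)
      rw [this, h1]

theorem life_spec : Claim_equal_life := by
  intro arr n _ hpre
  unfold Spec_life life life_alt
  by_cases hle : n ≤ (arr.length : Int)
  case neg =>
    have hex : ∃ k : Nat, k < arr.length ∧ (arr.take (k + 1)).sum < 0 := by
      unfold Pre_life at hpre; tauto
    have hn : n ≥ 0 := by omega
    rw [loop_eq2 arr.length arr 0 n 0 0 le_rfl (by omega) (by simp)
      (by simpa using elems_isSome arr hex)]
    have hslice : PySem.List.slice arr (some 0) (some n) = arr := by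
      rw [PySem.List.slice_zero_start, PySem.List.slice_to arr hn]
      exact List.take_of_length_le (by omega)
    simp only [if_pos hn, hslice, Int.toNat_zero, List.drop_zero]
    rw [elems_eq]
    cases firstNegIdx (prefixSums 0 arr) 0 <;> simp
  case pos =>
  by_cases hn : n ≥ 0
  · rw [loop_eq (n - 0).toNat arr 0 n 0 0 le_rfl hle rfl]
    have hslice : PySem.List.slice arr (some 0) (some n) = arr.take n.toNat := by
      rw [PySem.List.slice_zero_start, PySem.List.slice_to arr hn]
    simp only [if_pos hn, hslice, Int.sub_zero]
    rw [elems_eq]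
    cases h : firstNegIdx (prefixSums 0 (arr.take n.toNat)) 0 <;> simp [h]
  · rw [PySem.List.pyRange_one_eq_nil (by omega)]
    simp [lifeLoop, if_neg hn, prefixSums, firstNegIdx]
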